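-- pv_equiv track=rewrite | github.com/chrismmorin-ux/Perspective-Cosmology | verification/sympy/so11_beta_analytic_derivation.py | canon_single
-- ===== SOURCE A (Python) =====
-- def canon_single(t):
--     """Canonical form of a trace under cyclic + reversal (all matrices symmetric)."""
--     t = tuple(t)
--     n = len(t)
--     if n == 0:
--         return ()
--     best = t
--     for i in range(n):
--         rot = t[i:] + t[:i]
--         if rot < best:
--             best = rot
--         rev = tuple(reversed(rot))
--         if rev < best:
--             best = rev
--     return best
-- ===== SOURCE B (Python) =====
-- def canon_single(t):
--     """Canonical form of a trace under cyclic + reversal (all matrices symmetric)."""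
--     t = tuple(t)
--     n = len(t)
--     if n == 0:
--         return ()
--     rots = [t[i:] + t[:i] for i in range(n)]
--     cands = rots + [c[::-1] for c in rots]
--     for j in range(n):
--         m = min(c[j] for c in cands)
--         cands = [c for c in cands if c[j] == m]
--     return cands[0]
-- ===== Notes on version B (the rewrite author's own statement) =====
-- stated objective: alternative
-- what changed: B replaces A's row-wise scan (build each rotation and its reversal, compare whole tuples against a running best) with column-wise simultaneous refinement: keep all 2n candidates and for each position j keep only those with the minimal j-th element, so no two candidates are ever compared as tuples; the surviving candidates are all equal to the lexicographic minimum.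
import Mathlib
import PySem

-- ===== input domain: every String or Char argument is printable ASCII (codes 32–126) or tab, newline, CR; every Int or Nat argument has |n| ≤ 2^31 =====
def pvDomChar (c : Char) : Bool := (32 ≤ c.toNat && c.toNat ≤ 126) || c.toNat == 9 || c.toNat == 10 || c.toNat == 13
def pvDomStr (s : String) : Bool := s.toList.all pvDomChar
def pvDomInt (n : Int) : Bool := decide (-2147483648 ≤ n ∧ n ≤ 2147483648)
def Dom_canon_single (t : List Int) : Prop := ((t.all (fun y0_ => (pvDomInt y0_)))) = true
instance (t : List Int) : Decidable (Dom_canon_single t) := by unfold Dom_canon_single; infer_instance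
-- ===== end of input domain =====

-- B replaces A's running-min scan over whole rotations by column-wise simultaneous refinement
-- (keep all 2n candidates, filter per position by the minimal element there); objective: alternative
-- algorithm, same worst-case cost.


-- ===== PORT A =====
def canon_single (t : List Int) : List Int :=
  let n : Int := t.length
  if n = 0 then []
  else
    (PySem.List.pyRange 0 n 1).foldl (fun best i =>
      let rot := PySem.List.slice t (some i) none ++ PySem.List.slice t none (some i)
      let best := if rot < best then rot else best
      let rev := rot.reverse
      if rev < best then rev else best) t

-- ===== PORT B =====
-- min(<iterable>) on a nonempty list, as Python computes it (fold of binary min over the tail)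
def pyMinList (l : List Int) : Int :=
  match l with
  | [] => 0   -- unreachable: min() is only applied to nonempty lists here
  | x :: xs => xs.foldl min x

def canon_single_alt (t : List Int) : List Int :=
  let n : Int := t.length
  if n = 0 then []
  else
    let rots := (PySem.List.pyRange 0 n 1).map (fun i =>
      PySem.List.slice t (some i) none ++ PySem.List.slice t none (some i))
    -- c[::-1] is List.reverse (PySem.List.slice?_none_none_neg_one)
    let cands := rots ++ rots.map List.reverse
    let final := (PySem.List.pyRange 0 n 1).foldl (fun cands j =>
      let m := pyMinList (cands.map (fun c => PySem.List.pyGetD c j 0))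
      cands.filter (fun c => PySem.List.pyGetD c j 0 == m)) cands
    -- cands[0]; final is never empty (the lexicographic minimum always survives)
    PySem.List.pyGetD final 0 []

-- ===== PRECONDITION & SPEC =====
def Spec_canon_single (t : List Int) (out : List Int) : Prop := out = canon_single_alt t
instance (t : List Int) (out : List Int) : Decidable (Spec_canon_single t out) := by unfold Spec_canon_single; infer_instance

-- ===== CLAIM (what is proved, stated in full; the proofs are below) =====
def Claim_equal_canon_single : Prop := ∀ (t : List Int), Dom_canon_single t → Spec_canon_single t (canon_single t)

-- ===== LEMMAS AND PROOFS =====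

-- rotation of t by k, and the candidate set A scans
def rotN (t : List Int) (k : Nat) : List Int := t.drop k ++ t.take k
def candA (t : List Int) : List (List Int) :=
  (List.range t.length).flatMap (fun k => [rotN t k, (rotN t k).reverse])
-- B's candidate list, after stripping the PySem wrappers
def candB (t : List Int) : List (List Int) :=
  ((List.range t.length).map (rotN t)) ++ ((List.range t.length).map (fun k => (rotN t k).reverse))
-- one round of B's column filter, on Nat column index
def stepF (C : List (List Int)) (j : Nat) : List (List Int) :=
  let m := pyMinList (C.map (fun c => c.getD j 0))
  C.filter (fun c => c.getD j 0 == m)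

lemma if_lt_eq_min (x b : List Int) : (if x < b then x else b) = min b x := by
  by_cases hxb : x < b
  · rw [if_pos hxb, min_eq_right (le_of_lt hxb)]
  · rw [if_neg hxb, min_eq_left (not_lt.mp hxb)]

lemma foldl_two_min (f : Nat → List Int) :
    ∀ (l : List Nat) (a : List Int),
      l.foldl (fun best k =>
        let rot := f k
        let best := if rot < best then rot else best
        let rev := rot.reverse
        if rev < best then rev else best) a
      = (l.flatMap fun k => [f k, (f k).reverse]).foldl min a := by
  intro l
  induction l with
  | nil => intro a; rfl
  | cons k l ih =>
    intro a
    simp only [List.foldl_cons, List.flatMap_cons, List.foldl_append, ih]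
    simp only [List.foldl_nil, if_lt_eq_min]

lemma foldl_min_le_init {α : Type} [LinearOrder α] : ∀ (l : List α) (a : α), l.foldl min a ≤ a := by
  intro l
  induction l with
  | nil => intro a; simp
  | cons x l ih => intro a; exact le_trans (ih (min a x)) (min_le_left a x)

lemma foldl_min_le_mem {α : Type} [LinearOrder α] :
    ∀ (l : List α) (a x : α), x ∈ l → l.foldl min a ≤ x := by
  intro l
  induction l with
  | nil => intro a x hx; simp at hx
  | cons y l ih =>
    intro a x hx
    rcases List.mem_cons.mp hx with h | h
    · subst h; exact le_trans (foldl_min_le_init l (min a x)) (min_le_right a x)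
    · exact ih (min a y) x h

lemma foldl_min_mem_or {α : Type} [LinearOrder α] :
    ∀ (l : List α) (a : α), l.foldl min a = a ∨ l.foldl min a ∈ l := by
  intro l
  induction l with
  | nil => intro a; left; rfl
  | cons x l ih =>
    intro a
    rcases ih (min a x) with h | h
    · rcases min_choice a x with hc | hc
      · left; simp only [List.foldl_cons]; rw [h, hc]
      · right; simp only [List.foldl_cons]; rw [h, hc]; exact List.mem_cons_self
    · right; exact List.mem_cons_of_mem x h

lemma rotN_zero (t : List Int) : rotN t 0 = t := by simp [rotN]

lemma length_rotN (t : List Int) (k : Nat) (hk : k ≤ t.length) :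
    (rotN t k).length = t.length := by
  simp [rotN]; omega

-- lex: a common prefix followed by a smaller element is smaller
lemma append_lt_left (p : List Int) : ∀ (u v : List Int), u < v → p ++ u < p ++ v := by
  induction p with
  | nil => intro u v h; exact h
  | cons a p ih => intro u v h; exact List.Lex.cons (ih u v h)

lemma lt_of_take_eq_getD_lt (c b : List Int) (j : Nat) (hc : j < c.length) (hb : j < b.length)
    (htake : c.take j = b.take j) (hlt : c.getD j 0 < b.getD j 0) : c < b := by
  conv_lhs => rw [← List.take_append_drop j c]
  conv_rhs => rw [← List.take_append_drop j b]
  rw [htake]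
  apply append_lt_left
  rw [List.drop_eq_getElem_cons hc, List.drop_eq_getElem_cons hb]
  apply List.Lex.rel
  rw [← List.getD_eq_getElem c 0 hc, ← List.getD_eq_getElem b 0 hb]
  exact hlt

lemma take_succ_eq_iff (c b : List Int) (j : Nat) (hc : j < c.length) (hb : j < b.length) :
    c.take (j + 1) = b.take (j + 1) ↔ (c.getD j 0 = b.getD j 0 ∧ c.take j = b.take j) := by
  rw [List.take_add_one, List.take_add_one, List.getElem?_eq_getElem hc, List.getElem?_eq_getElem hb,
    List.getD_eq_getElem c 0 hc, List.getD_eq_getElem b 0 hb]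
  constructor
  · intro h
    have hlen : (c.take j).length = (b.take j).length := by simp; omega
    obtain ⟨h1, h2⟩ := List.append_inj h hlen
    simp at h2
    exact ⟨h2, h1⟩
  · rintro ⟨h1, h2⟩
    rw [h1, h2]

-- the column-filter loop keeps exactly the candidates agreeing with the lexmin b on the prefix
lemma loop_inv (b : List Int) (C : List (List Int)) (n : Nat)
    (hlen : ∀ c ∈ C, c.length = n) (hb : b ∈ C) (hmin : ∀ c ∈ C, b ≤ c) :
    ∀ j, j ≤ n → (List.range j).foldl stepF C = C.filter (fun c => c.take j == b.take j) := by
  intro j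
  induction j with
  | zero =>
    intro _
    simp
  | succ j ih =>
    intro hj1
    have hj : j < n := by omega
    rw [List.range_succ, List.foldl_append, List.foldl_cons, List.foldl_nil, ih (by omega)]
    set Cj := C.filter (fun c => c.take j == b.take j) with hCj
    have hbj : b ∈ Cj := List.mem_filter.mpr ⟨hb, by simp⟩
    have hmemCj : ∀ c ∈ Cj, c ∈ C ∧ c.take j = b.take j := by
      intro c hcj
      have h := List.mem_filter.mp hcj
      exact ⟨h.1, by simpa using h.2⟩
    -- the column minimum over the survivors is b's j-th element
    have hm : pyMinList (Cj.map (fun c => c.getD j 0)) = b.getD j 0 := by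
      obtain ⟨c0, cs, hcons⟩ := List.exists_cons_of_ne_nil (List.ne_nil_of_mem hbj)
      rw [hcons]
      simp only [List.map_cons, pyMinList]
      apply le_antisymm
      · -- ≤ : b is among the survivors
        rcases List.mem_cons.mp (hcons ▸ hbj) with hb0 | hbs
        · rw [← hb0]; exact foldl_min_le_init _ _
        · exact foldl_min_le_mem _ _ _ (List.mem_map_of_mem hbs)
      · -- ≥ : the fold's value is some survivor's j-th element, and b is lex-minimal
        have hval : ∀ x ∈ (c0.getD j 0) :: cs.map (fun c => c.getD j 0), b.getD j 0 ≤ x := by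
          intro x hx
          have hx' : ∃ c ∈ Cj, c.getD j 0 = x := by
            rcases List.mem_cons.mp hx with h | h
            · exact ⟨c0, hcons ▸ List.mem_cons_self, h.symm⟩
            · obtain ⟨c, hc, hcx⟩ := List.mem_map.mp h
              exact ⟨c, hcons ▸ List.mem_cons_of_mem c0 hc, hcx⟩
          obtain ⟨c, hc, rfl⟩ := hx'
          obtain ⟨hcC, hctake⟩ := hmemCj c hc
          by_contra hcon
          rw [not_le] at hcon
          have : c < b := lt_of_take_eq_getD_lt c b j
            (by rw [hlen c hcC]; exact hj) (by rw [hlen b hb]; exact hj) hctake hcon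
          exact absurd (hmin c hcC) (not_le.mpr this)
        rcases foldl_min_mem_or (cs.map fun c => c.getD j 0) (c0.getD j 0) with h | h
        · rw [h]; exact hval _ List.mem_cons_self
        · exact hval _ (List.mem_cons_of_mem _ h)
    rw [show stepF Cj j = Cj.filter (fun c => c.getD j 0 == b.getD j 0) by
      simp only [stepF]; rw [hm]]
    rw [hCj, List.filter_filter]
    apply List.filter_congr
    intro c hcC
    have h := take_succ_eq_iff c b j (by rw [hlen c hcC]; exact hj) (by rw [hlen b hb]; exact hj)
    rw [Bool.eq_iff_iff]
    simp only [Bool.and_eq_true, beq_iff_eq]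
    exact ⟨fun hh => h.mpr hh, fun hh => h.mp hh⟩

-- membership in the two candidate lists coincides
lemma mem_candB_iff_candA (t : List Int) (c : List Int) : c ∈ candB t ↔ c ∈ candA t := by
  simp only [candB, candA, List.mem_append, List.mem_map, List.mem_flatMap, List.mem_range,
    List.mem_cons, List.not_mem_nil, or_false]
  constructor
  · rintro (⟨k, hk, rfl⟩ | ⟨k, hk, rfl⟩)
    · exact ⟨k, hk, Or.inl rfl⟩
    · exact ⟨k, hk, Or.inr rfl⟩
  · rintro ⟨k, hk, rfl | rfl⟩
    · exact Or.inl ⟨k, hk, rfl⟩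
    · exact Or.inr ⟨k, hk, rfl⟩

lemma length_mem_candB (t : List Int) (c : List Int) (hc : c ∈ candB t) : c.length = t.length := by
  rcases List.mem_append.mp hc with h | h
  · obtain ⟨k, hk, rfl⟩ := List.mem_map.mp h
    exact length_rotN t k (le_of_lt (List.mem_range.mp hk))
  · obtain ⟨k, hk, rfl⟩ := List.mem_map.mp h
    rw [List.length_reverse]
    exact length_rotN t k (le_of_lt (List.mem_range.mp hk))

-- agreement on nonempty input
lemma ab_eq (t : List Int) (h : t ≠ []) : canon_single t = canon_single_alt t := by
  have hlen : 0 < t.length := List.length_pos_of_ne_nil h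
  have hn0 : ¬ ((t.length : Int) = 0) := by simpa using h
  -- A's scan is a running minimum over candA
  have hA : canon_single t = (candA t).foldl min t := by
    simp only [canon_single, if_neg hn0]
    rw [PySem.List.pyRange_one]
    simp only [sub_zero, Int.toNat_natCast, List.foldl_map, zero_add,
      PySem.List.slice_from_natCast, PySem.List.slice_to_natCast]
    rw [foldl_two_min (fun k => t.drop k ++ t.take k)]
    rfl
  set vA := (candA t).foldl min t with hvA
  have hcand_t : t ∈ candA t :=
    List.mem_flatMap.mpr ⟨0, List.mem_range.mpr hlen, by simp [rotN_zero]⟩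
  have hvAmem : vA ∈ candA t := by
    rcases foldl_min_mem_or (candA t) t with h' | h'
    · rw [hvA, h']; exact hcand_t
    · exact h'
  have hvAle : ∀ x ∈ candA t, vA ≤ x := fun x hx => foldl_min_le_mem _ _ _ hx
  have hvAmemB : vA ∈ candB t := (mem_candB_iff_candA t vA).mpr hvAmem
  have hvAleB : ∀ x ∈ candB t, vA ≤ x := fun x hx => hvAle x ((mem_candB_iff_candA t x).mp hx)
  have hvAlen : vA.length = t.length := length_mem_candB t vA hvAmemB
  -- B's loop, stripped to stepF over List.range
  have hB : canon_single_alt t =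
      ((List.range t.length).foldl stepF (candB t)).getD 0 [] := by
    simp only [canon_single_alt, if_neg hn0]
    rw [PySem.List.pyRange_one]
    simp only [sub_zero, Int.toNat_natCast, List.foldl_map, List.map_map, zero_add,
      PySem.List.slice_from_natCast, PySem.List.slice_to_natCast, PySem.List.pyGetD_natCast,
      PySem.List.pyGetD_zero, Function.comp_def]
    rfl
  -- run the invariant to the end
  have hfinal : (List.range t.length).foldl stepF (candB t)
      = (candB t).filter (fun c => c.take t.length == vA.take t.length) :=
    loop_inv vA (candB t) t.length (length_mem_candB t) hvAmemB hvAleB t.length le_rfl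
  have hfin_mem : ∀ c ∈ (List.range t.length).foldl stepF (candB t), c = vA := by
    intro c hc
    rw [hfinal] at hc
    have h' := List.mem_filter.mp hc
    have hcl : c.length = t.length := length_mem_candB t c h'.1
    have htk : c.take t.length = vA.take t.length := by simpa using h'.2
    rwa [List.take_of_length_le (le_of_eq hcl), List.take_of_length_le (le_of_eq hvAlen)] at htk
  have hfin_ne : (List.range t.length).foldl stepF (candB t) ≠ [] := by
    rw [hfinal]
    exact List.ne_nil_of_mem (List.mem_filter.mpr ⟨hvAmemB, by simp⟩)
  rw [hA, hB]
  obtain ⟨c0, cs, hcons⟩ := List.exists_cons_of_ne_nil hfin_ne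
  rw [hcons, List.getD_cons_zero]
  exact (hfin_mem c0 (hcons ▸ List.mem_cons_self)).symm

-- ===== VERDICT (by name: the statement is the Claim_ definition above) =====
theorem canon_single_spec : Claim_equal_canon_single := by
  intro t _
  unfold Spec_canon_single
  by_cases h : t = []
  · subst h; rfl
  · exact ab_eq t h
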